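-- pv_equiv track=rewrite | github.com/elrobin/gov-affiliation-classifier | ror_knowledge.py | _suggest_org_type_from_ror_types
-- ===== SOURCE A (Python) =====
-- from typing import Any, Dict, List, Optional
--
-- def _suggest_org_type_from_ror_types(ror_types: List[str]) -> Optional[str]:
--     """
--     Suggest org_type based on ROR types.
--
--     Parameters
--     ----------
--     ror_types:
--         List of ROR type strings.
--
--     Returns
--     -------
--     str or None
--         Suggested org_type, or None if unclear.
--     """
--     if not ror_types:
--         return None
--
--     # Map ROR types to our org_type taxonomy
--     type_lower = [t.lower() for t in ror_types]
--
--     if "education" in type_lower: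
--         return "university"
--     if "government" in type_lower:
--         return "government"
--     if "healthcare" in type_lower:
--         return "hospital"
--     if "company" in type_lower or "facility" in type_lower:
--         return "company"
--     if "nonprofit" in type_lower or "archive" in type_lower:
--         return "ngo"
--
--     return None
-- ===== SOURCE B (Python) =====
-- from typing import List, Optional
--
-- # keyword -> (priority, org_type); lower priority wins.
-- _ROR_PRIORITY = {
--     "education": (0, "university"),
--     "government": (1, "government"),
--     "healthcare": (2, "hospital"),
--     "company": (3, "company"),
--     "facility": (3, "company"),
--     "nonprofit": (4, "ngo"),
--     "archive": (4, "ngo"),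
-- }
--
-- def _suggest_org_type_from_ror_types(ror_types: List[str]) -> Optional[str]:
--     best = None  # (priority, org_type) of the best keyword seen so far
--     for t in ror_types:
--         hit = _ROR_PRIORITY.get(t.lower())
--         if hit is not None and (best is None or hit[0] < best[0]):
--             best = hit
--     return best[1] if best is not None else None
-- ===== Notes on version B (the rewrite author's own statement) =====
-- stated objective: alternative
-- what changed: Replaces the per-rule membership scans over the lowered list by a single pass over the input that reduces to the minimum-priority keyword via a keyword->(priority,org_type) table, returning that keyword's org_type.
import Mathlib
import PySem

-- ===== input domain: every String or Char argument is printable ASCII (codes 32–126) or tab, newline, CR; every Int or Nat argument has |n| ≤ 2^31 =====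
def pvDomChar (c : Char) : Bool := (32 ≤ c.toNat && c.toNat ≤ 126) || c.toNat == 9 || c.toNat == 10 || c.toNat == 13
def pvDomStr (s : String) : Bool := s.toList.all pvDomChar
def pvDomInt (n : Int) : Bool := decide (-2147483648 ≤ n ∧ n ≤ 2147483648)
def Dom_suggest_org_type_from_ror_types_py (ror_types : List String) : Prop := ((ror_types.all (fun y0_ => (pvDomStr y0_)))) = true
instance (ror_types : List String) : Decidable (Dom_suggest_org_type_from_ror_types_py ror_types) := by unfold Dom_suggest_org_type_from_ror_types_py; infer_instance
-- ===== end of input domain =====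

-- B replaces A's per-rule membership scans by a single pass over the input that keeps the
-- minimum-priority keyword via a keyword -> (priority, org_type) table (alternative decomposition).


-- ===== PORT A =====
-- Literal transliteration of A's empty guard and if-chain over `type_lower`.
def suggest_org_type_from_ror_types_py (ror_types : List String) : Option String :=
  if ror_types = [] then none
  else
    let type_lower := ror_types.map PySem.Str.lower
    if type_lower.contains "education" then some "university"
    else if type_lower.contains "government" then some "government"
    else if type_lower.contains "healthcare" then some "hospital"
    else if type_lower.contains "company" || type_lower.contains "facility" then some "company"
    else if type_lower.contains "nonprofit" || type_lower.contains "archive" then some "ngo"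
    else none

-- ===== PORT B =====
-- B: keyword -> (priority, org_type) table; one pass over the input keeping the minimum-priority hit.
def pvRorPriority : PySem.Dict String (Int × String) :=
  PySem.Dict.ofList
    [("education", (0, "university")),
     ("government", (1, "government")),
     ("healthcare", (2, "hospital")),
     ("company", (3, "company")),
     ("facility", (3, "company")),
     ("nonprofit", (4, "ngo")),
     ("archive", (4, "ngo"))]

-- loop body: `hit = _ROR_PRIORITY.get(t.lower()); if hit is not None and (best is None or hit[0] < best[0]): best = hit`
def pvStep (best : Option (Int × String)) (t : String) : Option (Int × String) :=
  match pvRorPriority.get? (PySem.Str.lower t) with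
  | none => best
  | some h =>
    match best with
    | none => some h
    | some b => if h.1 < b.1 then some h else best

def suggest_org_type_from_ror_types_py_alt (ror_types : List String) : Option String :=
  match ror_types.foldl pvStep none with
  | some b => some b.2
  | none => none

-- ===== PRECONDITION & SPEC =====
def Spec_suggest_org_type_from_ror_types_py (ror_types : List String) (out : Option String) : Prop := out = suggest_org_type_from_ror_types_py_alt ror_types
instance (ror_types : List String) (out : Option String) : Decidable (Spec_suggest_org_type_from_ror_types_py ror_types out) := by unfold Spec_suggest_org_type_from_ror_types_py; infer_instance

-- ===== CLAIM =====
def Claim_equal_suggest_org_type_from_ror_types_py : Prop := ∀ (ror_types : List String), Dom_suggest_org_type_from_ror_types_py ror_types → Spec_suggest_org_type_from_ror_types_py ror_types (suggest_org_type_from_ror_types_py ror_types)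

-- ===== LEMMAS AND PROOFS =====

-- Left-biased minimum on optional (priority, value) pairs: pvStep's combining operation.
def pvMo (a h : Option (Int × String)) : Option (Int × String) :=
  match h with
  | none => a
  | some h' =>
    match a with
    | none => some h'
    | some b => if h'.1 < b.1 then some h' else some b

lemma pvStep_eq_mo (a : Option (Int × String)) (t : String) :
    pvStep a t = pvMo a (pvRorPriority.get? (PySem.Str.lower t)) := by
  unfold pvStep pvMo
  cases pvRorPriority.get? (PySem.Str.lower t) <;> cases a <;> simp

lemma pvMo_none_left (h : Option (Int × String)) : pvMo none h = h := by cases h <;> rfl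

lemma pvMo_assoc (a h b : Option (Int × String)) :
    pvMo (pvMo a h) b = pvMo a (pvMo h b) := by
  rcases a with _ | ⟨p, va⟩ <;> rcases h with _ | ⟨q, vh⟩ <;> rcases b with _ | ⟨r, vb⟩ <;>
    simp only [pvMo] <;> split_ifs <;> simp only [pvMo] <;> split_ifs <;>
    first | rfl | omega

-- The lookup table as a nested-if case split on the key.
lemma pvHit_spec (x : String) : pvRorPriority.get? x =
    if x = "education" then some (0, "university")
    else if x = "government" then some (1, "government")
    else if x = "healthcare" then some (2, "hospital")
    else if x = "company" then some (3, "company")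
    else if x = "facility" then some (3, "company")
    else if x = "nonprofit" then some (4, "ngo")
    else if x = "archive" then some (4, "ngo")
    else none := by
  simp [pvRorPriority, PySem.Dict.ofList, PySem.Dict.update, PySem.Dict.get?_insert]
  split_ifs <;> simp_all

lemma pvFoldl_mo (l : List String) (a : Option (Int × String)) :
    l.foldl pvStep a = pvMo a (l.foldl pvStep none) := by
  induction l generalizing a with
  | nil => cases a <;> simp [pvMo]
  | cons x l ih =>
    simp only [List.foldl_cons]
    rw [ih (pvStep a x), ih (pvStep none x), pvStep_eq_mo, pvStep_eq_mo none x, pvMo_none_left,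
      pvMo_assoc]

-- The fold's value written as A's membership chain (carrying the priorities).
def pvChain (l : List String) : Option (Int × String) :=
  let tl := l.map PySem.Str.lower
  if tl.contains "education" then some (0, "university")
  else if tl.contains "government" then some (1, "government")
  else if tl.contains "healthcare" then some (2, "hospital")
  else if tl.contains "company" || tl.contains "facility" then some (3, "company")
  else if tl.contains "nonprofit" || tl.contains "archive" then some (4, "ngo")
  else none

lemma pvFold_eq_chain (l : List String) : l.foldl pvStep none = pvChain l := by
  induction l with
  | nil => simp [pvChain]
  | cons x l ih =>
    simp only [List.foldl_cons]
    rw [pvFoldl_mo, ih, pvStep_eq_mo, pvHit_spec, pvMo_none_left]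
    by_cases h1 : PySem.Str.lower x = "education"
    · simp [pvChain, h1]
      split_ifs <;> simp [pvMo]
    by_cases h2 : PySem.Str.lower x = "government"
    · simp [pvChain, h2]
      split_ifs <;> simp [pvMo]
    by_cases h3 : PySem.Str.lower x = "healthcare"
    · simp [pvChain, h3]
      split_ifs <;> simp [pvMo]
    by_cases h4 : PySem.Str.lower x = "company"
    · simp [pvChain, h4]
      split_ifs <;> simp [pvMo]
    by_cases h5 : PySem.Str.lower x = "facility"
    · simp [pvChain, h5]
      split_ifs <;> simp [pvMo]
    by_cases h6 : PySem.Str.lower x = "nonprofit"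
    · simp [pvChain, h6]
      split_ifs <;> simp [pvMo]
    by_cases h7 : PySem.Str.lower x = "archive"
    · simp [pvChain, h7]
      split_ifs <;> simp [pvMo]
    simp [pvChain, h1, h2, h3, h4, h5, h6, h7,
      Ne.symm h1, Ne.symm h2, Ne.symm h3, Ne.symm h4, Ne.symm h5, Ne.symm h6, Ne.symm h7]
    exact pvMo_none_left _

-- ===== VERDICT =====
theorem suggest_org_type_from_ror_types_py_spec : Claim_equal_suggest_org_type_from_ror_types_py := by
  intro ror_types _
  unfold Spec_suggest_org_type_from_ror_types_py
  unfold suggest_org_type_from_ror_types_py suggest_org_type_from_ror_types_py_alt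
  rw [pvFold_eq_chain]
  unfold pvChain
  by_cases h : ror_types = []
  · simp [h]
  · rw [if_neg h]
    dsimp only
    split_ifs <;> rfl
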